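-- pv_equiv track=rewrite | github.com/fahmi-ramadhan/resolution-refutation | parser.py | segment_sentence
-- ===== SOURCE A (Python) =====
-- OPERATORS = ["!", "&", "|", ">", "=", "(", ")"]
--
-- def segment_sentence(sentence):
--     """
--     Tokenizes a propositional logic sentence into a list of tokens.
--
--     Args:
--         sentence (str): A string representing a propositional logic formula
--
--     Returns:
--         list: A list of tokens (operators and literals)
--
--     Example:
--         >>> segment_sentence("A & (B | !C)")
--         ['A', '&', '(', 'B', '|', '!', 'C', ')']
--     """
--     segmented_sentence = []
--
--     i = 0
--     L = len(sentence)
--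
--     while i < L:
--         if sentence[i] in OPERATORS:
--             segmented_sentence.append(sentence[i])
--             i += 1
--         elif sentence[i] == " ":
--             i += 1
--         else:
--             literal = ""
--             while i < L and not sentence[i] in OPERATORS and sentence[i] != " ":
--                 literal += sentence[i]
--                 i += 1
--             segmented_sentence.append(literal)
--
--     return segmented_sentence
-- ===== SOURCE B (Python) =====
-- OPERATORS = ["!", "&", "|", ">", "=", "(", ")"]
--
-- def segment_sentence(sentence):
--     """Pad every operator with spaces, then split on spaces and drop empty pieces."""
--     for op in OPERATORS:
--         sentence = sentence.replace(op, " " + op + " ")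
--     return [tok for tok in sentence.split(" ") if tok]
-- ===== Notes on version B (the rewrite author's own statement) =====
-- stated objective: faster
-- what changed: Replaced the index-based scanner with its inner literal-gobbling loop and per-character string concatenation by a rewrite-then-split strategy: each operator is padded with spaces via str.replace, then the string is split on spaces and empty pieces dropped.
import Mathlib
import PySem

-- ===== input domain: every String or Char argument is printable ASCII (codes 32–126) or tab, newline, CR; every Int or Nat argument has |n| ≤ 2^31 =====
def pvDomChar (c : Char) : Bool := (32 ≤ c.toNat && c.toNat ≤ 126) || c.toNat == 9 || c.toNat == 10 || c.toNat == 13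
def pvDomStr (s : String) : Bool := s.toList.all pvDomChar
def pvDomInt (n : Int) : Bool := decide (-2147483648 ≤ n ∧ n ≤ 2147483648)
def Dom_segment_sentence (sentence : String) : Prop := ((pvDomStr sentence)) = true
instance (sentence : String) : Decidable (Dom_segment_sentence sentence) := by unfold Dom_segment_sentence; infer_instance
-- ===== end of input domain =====

-- B replaces A's index-based scanner by a rewrite-then-split strategy (pad each operator with
-- spaces via replace, split on spaces, drop empties); same output, measured faster (A builds literals by repeated string concatenation).

-- ===== PORT A =====
-- OPERATORS = ["!", "&", "|", ">", "=", "(", ")"] ; membership test 'sentence[i] in OPERATORS'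
def pvIsOp (c : Char) : Bool := c ∈ ['!', '&', '|', '>', '=', '(', ')']

-- inner while loop of A: consume literal characters, return (literal, remaining characters)
def pvSegLit : List Char → List Char × List Char
  | [] => ([], [])
  | c :: cs =>
      if !pvIsOp c && c ≠ ' ' then
        let p := pvSegLit cs
        (c :: p.1, p.2)
      else ([], c :: cs)

theorem pvSegLit_len (cs : List Char) : (pvSegLit cs).2.length ≤ cs.length := by
  induction cs with
  | nil => simp [pvSegLit]
  | cons c cs ih =>
      simp only [pvSegLit]
      split
      · exact Nat.le_succ_of_le ih
      · simp

-- outer while loop of A (advancing the index = consuming the remaining suffix)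
def pvSegA : List Char → List String
  | [] => []
  | c :: cs =>
      if pvIsOp c then String.ofList [c] :: pvSegA cs
      else if c = ' ' then pvSegA cs
      else
        let p := pvSegLit cs
        String.ofList (c :: p.1) :: pvSegA p.2
termination_by cs => cs.length
decreasing_by
  all_goals simp
  all_goals first
    | omega
    | exact pvSegLit_len cs

def segment_sentence (sentence : String) : List String := pvSegA sentence.toList

-- ===== PORT B =====
def pvOps : List String := ["!", "&", "|", ">", "=", "(", ")"]

-- Source B: for op in OPERATORS: sentence = sentence.replace(op, " " + op + " ")
--       return [tok for tok in sentence.split(" ") if tok]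
def segment_sentence_alt (sentence : String) : List String :=
  let padded := pvOps.foldl (fun acc op => PySem.Str.replace acc op (" " ++ op ++ " ")) sentence
  ((PySem.Str.split? padded " ").getD []).filter (fun tok => !(tok == ""))

-- ===== PRECONDITION & SPEC =====
def Spec_segment_sentence (sentence : String) (out : List String) : Prop := out = segment_sentence_alt sentence
instance (sentence : String) (out : List String) : Decidable (Spec_segment_sentence sentence out) := by unfold Spec_segment_sentence; infer_instance

-- ===== CLAIM (what is proved, stated in full; the proofs are below) =====
def Claim_equal_segment_sentence : Prop := ∀ (sentence : String), Dom_segment_sentence sentence → Spec_segment_sentence sentence (segment_sentence sentence)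

-- ===== LEMMAS AND PROOFS =====

-- per-character effect of padding: operators get surrounded by spaces
def pvExpand (c : Char) : List Char := if pvIsOp c then [' ', c, ' '] else [c]

-- step equations for PySem.Chars.replace.go with a single-character pattern
theorem pvRGoZero (o : Char) (new l acc : List Char) :
    PySem.Chars.replace.go [o] new 0 l acc = acc.reverse ++ l := by
  rw [PySem.Chars.replace.go]
theorem pvRGoNil (o : Char) (new acc : List Char) (n : Nat) :
    PySem.Chars.replace.go [o] new (n+1) [] acc = acc.reverse := by
  rw [PySem.Chars.replace.go]; simp
theorem pvRGoHit (o : Char) (new acc : List Char) (n : Nat) (t : List Char) :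
    PySem.Chars.replace.go [o] new (n+1) (o::t) acc
      = PySem.Chars.replace.go [o] new n t (new.reverse ++ acc) := by
  rw [PySem.Chars.replace.go]; simp
theorem pvRGoMiss (o c : Char) (hc : c ≠ o) (new acc : List Char) (n : Nat) (t : List Char) :
    PySem.Chars.replace.go [o] new (n+1) (c::t) acc
      = PySem.Chars.replace.go [o] new n t (c :: acc) := by
  rw [PySem.Chars.replace.go]
  rw [if_neg]
  simp [List.isPrefixOf]
  exact fun h => absurd h.symm hc

-- replace of a single-character pattern is a flatMap
theorem pvReplaceGo (o : Char) (new : List Char) :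
    ∀ (fuel : Nat) (l acc : List Char), l.length ≤ fuel →
      PySem.Chars.replace.go [o] new fuel l acc =
        acc.reverse ++ l.flatMap (fun c => if c = o then new else [c]) := by
  intro fuel
  induction fuel with
  | zero =>
      intro l acc h
      have : l = [] := List.eq_nil_of_length_eq_zero (Nat.le_zero.mp h)
      subst this
      rw [pvRGoZero]; simp
  | succ n ih =>
      intro l acc h
      match l with
      | [] => rw [pvRGoNil]; simp
      | c :: t =>
          have ht : t.length ≤ n := by simp at h; omega
          by_cases hc : c = o
          · subst hc
            rw [pvRGoHit, ih t _ ht]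
            simp
          · rw [pvRGoMiss o c hc, ih t _ ht]
            simp [hc]

theorem pvReplaceChar (s : List Char) (o : Char) (new : List Char) :
    PySem.Chars.replace s [o] new = s.flatMap (fun c => if c = o then new else [c]) := by
  unfold PySem.Chars.replace
  rw [if_neg (by simp)]
  rw [pvReplaceGo o new s.length s [] (le_refl _)]
  simp

-- folding single-character replaces = one flatMap over the whole operator set
theorem pvFoldReplace :
    ∀ (ops : List Char) (s : List Char), ops.Nodup → (' ' ∉ ops) →
      ops.foldl (fun acc o => PySem.Chars.replace acc [o] [' ', o, ' ']) s
        = s.flatMap (fun c => if c ∈ ops then [' ', c, ' '] else [c]) := by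
  intro ops
  induction ops with
  | nil => intro s _ _; simp
  | cons o rest ih =>
      intro s hnd hsp
      have hoR : o ∉ rest := (List.nodup_cons.mp hnd).1
      have hndR : rest.Nodup := (List.nodup_cons.mp hnd).2
      have hspR : ' ' ∉ rest := fun h => hsp (List.mem_cons_of_mem _ h)
      rw [List.foldl_cons, pvReplaceChar, ih _ hndR hspR, List.flatMap_assoc]
      apply List.flatMap_congr
      intro c _
      by_cases hc : c = o
      · subst hc
        simp [hspR, hoR]
      · simp only [if_neg hc]
        by_cases hcr : c ∈ rest
        · simp [hcr, List.mem_cons]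
        · simp [hcr, List.mem_cons, hc]

-- the string-level fold in the port computes exactly that flatMap
theorem pvFoldBridge :
    ∀ (ops : List Char) (s : String),
      (ops.foldl (fun acc o => PySem.Str.replace acc (String.ofList [o])
          (" " ++ String.ofList [o] ++ " ")) s).toList
        = ops.foldl (fun acc o => PySem.Chars.replace acc [o] [' ', o, ' ']) s.toList := by
  intro ops
  induction ops with
  | nil => intro s; simp
  | cons o rest ih =>
      intro s
      rw [List.foldl_cons, List.foldl_cons, ih]
      congr 1
      rw [PySem.Str.toList_replace]
      congr 1 <;> simp

theorem pvPadded (s : String) :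
    (pvOps.foldl (fun acc op => PySem.Str.replace acc op (" " ++ op ++ " ")) s).toList
      = s.toList.flatMap pvExpand := by
  have hops : pvOps = (['!', '&', '|', '>', '=', '(', ')'].map (fun o => String.ofList [o])) := by
    decide
  rw [hops, List.foldl_map, pvFoldBridge, pvFoldReplace _ _ (by decide) (by decide)]
  apply List.flatMap_congr
  intro c _
  simp [pvExpand, pvIsOp]

-- splitting on a single space, stated structurally
def pvSplitSp : List Char → List Char → List (List Char)
  | pre, [] => [pre]
  | pre, c :: t => if c = ' ' then pre :: pvSplitSp [] t else pvSplitSp (pre ++ [c]) t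

-- step equations for PySem.Chars.splitOn.go with separator [' ']
theorem pvSGoNil (cur : List Char) (acc : List (List Char)) (n : Nat) :
    PySem.Chars.splitOn.go [' '] (n+1) [] cur acc = (cur.reverse :: acc).reverse := by
  rw [PySem.Chars.splitOn.go]
  omega
theorem pvSGoHit (t cur : List Char) (acc : List (List Char)) (n : Nat) :
    PySem.Chars.splitOn.go [' '] (n+1) (' '::t) cur acc
      = PySem.Chars.splitOn.go [' '] n t [] (cur.reverse :: acc) := by
  rw [PySem.Chars.splitOn.go]; simp
theorem pvSGoMiss (c : Char) (hc : c ≠ ' ') (t cur : List Char) (acc : List (List Char)) (n : Nat) :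
    PySem.Chars.splitOn.go [' '] (n+1) (c::t) cur acc
      = PySem.Chars.splitOn.go [' '] n t (c :: cur) acc := by
  rw [PySem.Chars.splitOn.go]
  rw [if_neg]
  simp [List.isPrefixOf]
  exact fun h => absurd h.symm hc

theorem pvSplitGoEq :
    ∀ (fuel : Nat) (l cur : List Char) (acc : List (List Char)), l.length < fuel →
      PySem.Chars.splitOn.go [' '] fuel l cur acc = acc.reverse ++ pvSplitSp cur.reverse l := by
  intro fuel
  induction fuel with
  | zero => intro l cur acc h; omega
  | succ n ih =>
      intro l cur acc h
      match l with
      | [] => rw [pvSGoNil]; simp [pvSplitSp]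
      | c :: t =>
          have ht : t.length < n := by simp at h; omega
          by_cases hc : c = ' '
          · subst hc
            rw [pvSGoHit, ih t _ _ ht]
            simp [pvSplitSp]
          · rw [pvSGoMiss c hc, ih t _ _ ht]
            simp [pvSplitSp, hc]

theorem pvSplitOnSp (l : List Char) :
    PySem.Chars.splitOn l [' '] = pvSplitSp [] l := by
  unfold PySem.Chars.splitOn
  rw [pvSplitGoEq (l.length + 1) l [] [] (by omega)]
  simp

-- main invariant: split-after-padding, with empties dropped, is A's token list
theorem pvMain (n : Nat) :
    ∀ cs : List Char, cs.length ≤ n →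
      ((pvSplitSp [] (cs.flatMap pvExpand)).filter (fun t => !(t == [])) = (pvSegA cs).map String.toList) ∧
      (∀ pre : List Char, pre ≠ [] →
        (pvSplitSp pre (cs.flatMap pvExpand)).filter (fun t => !(t == [])) =
          (pre ++ (pvSegLit cs).1) :: ((pvSegA (pvSegLit cs).2).map String.toList)) := by
  induction n with
  | zero =>
      intro cs hcs
      have : cs = [] := List.eq_nil_of_length_eq_zero (Nat.le_zero.mp hcs)
      subst this
      constructor
      · simp [pvSplitSp, pvSegA]
      · intro pre hpre
        simp [pvSplitSp, pvSegLit, pvSegA, hpre]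
  | succ n ih =>
      intro cs hcs
      match cs with
      | [] =>
          constructor
          · simp [pvSplitSp, pvSegA]
          · intro pre hpre
            simp [pvSplitSp, pvSegLit, pvSegA, hpre]
      | c :: cs =>
          have hlen : cs.length ≤ n := by simp at hcs; omega
          have hcons : (c :: cs).flatMap pvExpand = pvExpand c ++ cs.flatMap pvExpand := by
            simp
          constructor
          · by_cases hop : pvIsOp c
            · have hsp : c ≠ ' ' := by
                intro h; subst h; simp [pvIsOp] at hop
              rw [hcons]
              simp only [pvExpand, hop, if_true, List.cons_append, List.nil_append]
              rw [show pvSplitSp [] (' ' :: c :: ' ' :: cs.flatMap pvExpand)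
                    = [] :: [c] :: pvSplitSp [] (cs.flatMap pvExpand) by
                simp [pvSplitSp, hsp]]
              rw [List.filter_cons, List.filter_cons]
              simp only [show ((!([] : List Char) == [])) = false by decide]
              rw [(ih cs hlen).1]
              simp [pvSegA, hop]
            · by_cases hsp : c = ' '
              · subst hsp
                rw [hcons]
                simp only [pvExpand, hop, if_false, Bool.false_eq_true, List.singleton_append]
                rw [show pvSplitSp [] ((' ' : Char) :: cs.flatMap pvExpand)
                      = [] :: pvSplitSp [] (cs.flatMap pvExpand) by simp [pvSplitSp]]
                rw [List.filter_cons]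
                simp only [show ((!([] : List Char) == [])) = false by decide]
                rw [(ih cs hlen).1]
                simp [pvSegA, pvIsOp]
              · rw [hcons]
                simp only [pvExpand, hop, if_false, Bool.false_eq_true, List.singleton_append]
                rw [show pvSplitSp [] (c :: cs.flatMap pvExpand)
                      = pvSplitSp [c] (cs.flatMap pvExpand) by simp [pvSplitSp, hsp]]
                rw [(ih cs hlen).2 [c] (by simp)]
                simp [pvSegA, hop, hsp]
          · intro pre hpre
            by_cases hop : pvIsOp c
            · have hspc : c ≠ ' ' := by
                intro h; subst h; simp [pvIsOp] at hop
              rw [hcons]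
              simp only [pvExpand, hop, if_true, List.cons_append, List.nil_append]
              rw [show pvSplitSp pre (' ' :: c :: ' ' :: cs.flatMap pvExpand)
                    = pre :: [c] :: pvSplitSp [] (cs.flatMap pvExpand) by
                simp [pvSplitSp, hspc]]
              rw [List.filter_cons, List.filter_cons]
              simp only [show ((!(pre == ([] : List Char)))) = true by simp [hpre],
                show ((!([c] == ([] : List Char)))) = true by simp, if_true]
              rw [(ih cs hlen).1]
              have hseg : pvSegLit (c :: cs) = ([], c :: cs) := by
                simp [pvSegLit, hop]
              rw [hseg]
              simp [pvSegA, hop]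
            · by_cases hsp : c = ' '
              · subst hsp
                rw [hcons]
                simp only [pvExpand, hop, if_false, Bool.false_eq_true, List.singleton_append]
                rw [show pvSplitSp pre ((' ' : Char) :: cs.flatMap pvExpand)
                      = pre :: pvSplitSp [] (cs.flatMap pvExpand) by simp [pvSplitSp]]
                rw [List.filter_cons]
                simp only [show ((!(pre == ([] : List Char)))) = true by simp [hpre], if_true]
                rw [(ih cs hlen).1]
                have hseg : pvSegLit (' ' :: cs) = ([], ' ' :: cs) := by
                  simp [pvSegLit]
                rw [hseg]
                simp [pvSegA, pvIsOp]
              · rw [hcons]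
                simp only [pvExpand, hop, if_false, Bool.false_eq_true, List.singleton_append]
                rw [show pvSplitSp pre (c :: cs.flatMap pvExpand)
                      = pvSplitSp (pre ++ [c]) (cs.flatMap pvExpand) by simp [pvSplitSp, hsp]]
                rw [(ih cs hlen).2 (pre ++ [c]) (by simp)]
                have hseg : pvSegLit (c :: cs) = (c :: (pvSegLit cs).1, (pvSegLit cs).2) := by
                  simp [pvSegLit, hop, hsp]
                rw [hseg]
                simp

-- ===== VERDICT (by name: the statement is the Claim_ definition above) =====
theorem segment_sentence_spec : Claim_equal_segment_sentence := by
  intro s _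
  unfold Spec_segment_sentence segment_sentence segment_sentence_alt
  dsimp only
  generalize hp : List.foldl (fun acc op => PySem.Str.replace acc op (" " ++ op ++ " ")) s pvOps = padded
  have hpadded : padded.toList = s.toList.flatMap pvExpand := by
    rw [← hp]; exact pvPadded s
  have hmapeq := PySem.Str.split?_map padded " "
  cases h : PySem.Str.split? padded " " with
  | none =>
      rw [h] at hmapeq
      simp [PySem.Chars.split?] at hmapeq
  | some strs =>
      rw [h] at hmapeq
      simp only [Option.map_some, PySem.Chars.split?] at hmapeq
      rw [if_neg (by simp [show (" ").toList = [' '] from by decide])] at hmapeq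
      have hstrs : strs.map String.toList = PySem.Chars.splitOn padded.toList ((" ").toList) :=
        Option.some.inj hmapeq
      rw [show (" ").toList = [' '] from by decide, pvSplitOnSp, hpadded] at hstrs
      have hinj : Function.Injective (List.map String.toList) :=
        List.map_injective_iff.mpr (fun a b hab => String.toList_inj.mp hab)
      have hq : (fun tok : String => !(tok == "")) = (fun t : List Char => !(t == [])) ∘ String.toList := by
        funext t
        by_cases ht : t = ""
        · simp [ht]
        · have h1 : (t == "") = false := by simp [ht]
          have h2 : (t.toList == ([] : List Char)) = false := by
            simp only [beq_eq_false_iff_ne, ne_eq]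
            intro h'
            exact ht (String.toList_inj.mp (by simp [h']))
          simp [Function.comp, h1, h2]
      apply hinj
      simp only [Option.getD_some]
      rw [hq, ← List.filter_map, hstrs]
      exact ((pvMain s.toList.length s.toList (le_refl _)).1).symm
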